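-- pv_equiv track=rewrite | github.com/memili-carrot/BaekjoonCode | 백준/Gold/20055. 컨베이어 벨트 위의 로봇/컨베이어 벨트 위의 로봇.py | process
-- ===== SOURCE A (Python) =====
-- from collections import deque
--
-- def process(n, k, a):
--     belt = deque(a)
--     robots = deque([False] * n)
--     zero = 0
--     count = 0
--
--     while True:
--         count += 1
--         belt.rotate(1)
--         robots.rotate(1)
--         robots[-1] = False
--         for i in range(n-2, -1, -1):
--             if robots[i] and not robots[i+1] and belt[i+1] > 0:
--                 robots[i] = False
--                 robots[i+1] = True
--                 belt[i+1] -= 1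
--                 if belt[i+1] == 0:
--                     zero += 1
--
--         robots[-1] = False
--
--         if belt[0] > 0:
--             robots[0] = True
--             belt[0] -= 1
--             if belt[0] == 0:
--                 zero += 1
--         if zero >= k:
--             break
--
--     return count
-- ===== SOURCE B (Python) =====
-- def process(n, k, a):
--     # Sparse event simulation: instead of a length-n boolean deque scanned
--     # cell by cell, keep only the robots, as a front-to-back list of their
--     # relative belt positions; the belt never rotates (cell at relative
--     # position p after t steps is belt[(p - t) % m]).
--     m = len(a)
--     belt = list(a)
--     robots = []  # relative positions, front robot first (strictly decreasing)
--     zero = 0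
--     t = 0
--     while True:
--         t += 1
--         # the belt (and every robot on it) advances one cell; a robot that
--         # reaches the download cell n-1 drops off
--         robots = [r + 1 for r in robots if r + 1 < n - 1]
--         # each robot, front to back, steps forward when the next cell is
--         # unoccupied and still has durability
--         moved = []
--         prev = n  # position of the nearest robot ahead (sentinel: none)
--         for r in robots:
--             j = (r + 1 - t) % m
--             if prev != r + 1 and belt[j] > 0:
--                 belt[j] -= 1
--                 if belt[j] == 0:
--                     zero += 1
--                 r += 1
--             if r < n - 1:
--                 moved.append(r)
--                 prev = r
--         robots = moved
--         # upload a new robot onto the entry cell when it has durability left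
--         j = (0 - t) % m
--         if belt[j] > 0:
--             belt[j] -= 1
--             if belt[j] == 0:
--                 zero += 1
--             robots.append(0)
--         if zero >= k:
--             return t
-- ===== Notes on version B (the rewrite author's own statement) =====
-- stated objective: alternative
-- what changed: A rotates two length-n deques and scans every belt cell per step; B keeps no occupancy array at all, maintaining only a sparse front-to-back list of robot positions over a never-rotated belt (rotation is an implicit step-counter offset), and each step advances/filters that list in two short passes over the robots instead of a cell-by-cell sweep.
-- outside the precondition, e.g. on process(3, 1, [1, 0]): A returns 2, B returns 2
import Mathlib
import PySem

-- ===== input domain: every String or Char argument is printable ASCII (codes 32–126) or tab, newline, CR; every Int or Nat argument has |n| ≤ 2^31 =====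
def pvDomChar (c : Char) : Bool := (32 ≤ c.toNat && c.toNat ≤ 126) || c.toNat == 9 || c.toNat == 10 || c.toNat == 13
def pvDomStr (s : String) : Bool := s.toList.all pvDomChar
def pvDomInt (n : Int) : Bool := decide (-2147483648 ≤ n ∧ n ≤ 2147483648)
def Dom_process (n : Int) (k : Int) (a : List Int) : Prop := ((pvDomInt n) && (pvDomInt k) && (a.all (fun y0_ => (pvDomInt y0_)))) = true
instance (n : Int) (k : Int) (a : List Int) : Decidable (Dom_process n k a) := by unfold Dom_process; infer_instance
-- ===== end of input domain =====

-- A scans a length-n boolean robot deque cell by cell each step, rotating both deques;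
-- B keeps only the robots, as a sparse front-to-back list of relative positions over a
-- never-rotated belt array; return-value equivalence is proved on Pre_process.
-- Both ports use a fuel counter (pvFuel) only to make the while-True loop a total
-- function; inside Pre_process the Python loops terminate well within that fuel.

-- ===== PORT A =====

-- deque.rotate(1): last element moves to the front
def pvRot1 {α : Type} (l : List α) : List α :=
  match l.getLast? with
  | none => []
  | some x => x :: l.dropLast

-- one pass of A's inner `for i in range(n-2, -1, -1)` loop body; state = (belt, robots, zero)
def pvBodyA (st : List Int × List Bool × Int) (i : Int) : List Int × List Bool × Int :=
  let belt := st.1; let robots := st.2.1; let zero := st.2.2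
  if PySem.List.pyGetD robots i false && !(PySem.List.pyGetD robots (i+1) false)
      && decide (0 < PySem.List.pyGetD belt (i+1) 0) then
    let robots := PySem.List.pySetD robots i false
    let robots := PySem.List.pySetD robots (i+1) true
    let belt := PySem.List.pySetD belt (i+1) (PySem.List.pyGetD belt (i+1) 0 - 1)
    let zero := if PySem.List.pyGetD belt (i+1) 0 = 0 then zero + 1 else zero
    (belt, robots, zero)
  else (belt, robots, zero)

-- the body of one `while True` iteration of A (rotate, clear, inner scan, clear, upload)
def pvStepA (n : Int) (st0 : List Int × List Bool × Int) : List Int × List Bool × Int :=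
  let belt := pvRot1 st0.1
  let robots := pvRot1 st0.2.1
  let robots := PySem.List.pySetD robots (-1) false
  let st := (PySem.List.pyRange (n-2) (-1) (-1)).foldl pvBodyA (belt, robots, st0.2.2)
  let belt := st.1; let robots := st.2.1; let zero := st.2.2
  let robots := PySem.List.pySetD robots (-1) false
  if 0 < PySem.List.pyGetD belt 0 0 then
    let robots := PySem.List.pySetD robots 0 true
    let belt := PySem.List.pySetD belt 0 (PySem.List.pyGetD belt 0 0 - 1)
    let zero := if PySem.List.pyGetD belt 0 0 = 0 then zero + 1 else zero
    (belt, robots, zero)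
  else (belt, robots, zero)

-- fuel makes the `while True` loop total; on fuel exhaustion (never inside Pre_) return 0
def pvLoopA : Nat → Int → Int → List Int × List Bool × Int → Int → Int
  | 0, _, _, _, _ => 0
  | fuel+1, n, k, st0, count0 =>
    let count := count0 + 1
    let st2 := pvStepA n st0
    if k ≤ st2.2.2 then count
    else pvLoopA fuel n k st2 count

-- an upper bound on the number of iterations A performs on any input in Pre_process
def pvFuel (a : List Int) : Nat :=
  (a.length + 1) * ((a.map (fun x => max x 0)).sum.toNat + 1) + 2

def process (n : Int) (k : Int) (a : List Int) : Int :=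
  pvLoopA (pvFuel a) n k (a, List.replicate n.toNat false, 0) 0

-- ===== PORT B =====

-- B's per-robot body (`for r in robots:` loop); state = (belt, moved, prev, zero)
def pvMoveB (n t m : Int) (st : List Int × List Int × Int × Int) (r0 : Int) :
    List Int × List Int × Int × Int :=
  let belt := st.1; let moved := st.2.1; let prev := st.2.2.1; let zero := st.2.2.2
  let j := PySem.Int.mod (r0 + 1 - t) m
  let p := if decide (prev ≠ r0 + 1) && decide (0 < PySem.List.pyGetD belt j 0) then
      let belt := PySem.List.pySetD belt j (PySem.List.pyGetD belt j 0 - 1)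
      let zero := if PySem.List.pyGetD belt j 0 = 0 then zero + 1 else zero
      (belt, zero, r0 + 1)
    else (belt, zero, r0)
  let belt := p.1; let zero := p.2.1; let r := p.2.2
  if r < n - 1 then (belt, moved ++ [r], r, zero) else (belt, moved, prev, zero)

-- one `while True` iteration of B, for the already-incremented step counter t;
-- state = (belt, robots, zero), robots = relative positions, front robot first
def pvStepB (n m t : Int) (st0 : List Int × List Int × Int) : List Int × List Int × Int :=
  let robots := st0.2.1.filterMap (fun r => if r + 1 < n - 1 then some (r + 1) else none)
  let res := robots.foldl (pvMoveB n t m) (st0.1, [], n, st0.2.2)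
  let belt := res.1; let robots := res.2.1; let zero := res.2.2.2
  let j := PySem.Int.mod (0 - t) m
  if 0 < PySem.List.pyGetD belt j 0 then
    let belt := PySem.List.pySetD belt j (PySem.List.pyGetD belt j 0 - 1)
    let zero := if PySem.List.pyGetD belt j 0 = 0 then zero + 1 else zero
    (belt, robots ++ [0], zero)
  else (belt, robots, zero)

def pvLoopB : Nat → Int → Int → Int → List Int × List Int × Int → Int → Int
  | 0, _, _, _, _, _ => 0
  | fuel+1, n, k, m, st0, t0 =>
    let t := t0 + 1
    let st2 := pvStepB n m t st0
    if k ≤ st2.2.2 then t else pvLoopB fuel n k m st2 t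

def process_alt (n : Int) (k : Int) (a : List Int) : Int :=
  pvLoopB (pvFuel a) n k (a.length : Int) (a, [], 0) 0

-- ===== PRECONDITION & SPEC =====
-- Pre_ excludes n < 1 or len(a) < 1 (A indexes an empty deque: IndexError), k > number of
-- positive belt cells (the zero count can never reach k: A loops forever), and the shape
-- n > len(a) with 0 < k, on which A raises IndexError as soon as a robot advances past the
-- belt's end; whether that happens is data-dependent, so the shape is excluded as a whole
-- (on its inputs where no robot gets that far A returns and B returns the same value).
def Pre_process (n : Int) (k : Int) (a : List Int) : Prop :=
  1 ≤ n ∧ 1 ≤ (a.length : Int) ∧ k ≤ ((a.filter (fun x => 0 < x)).length : Int) ∧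
    (n ≤ (a.length : Int) ∨ k ≤ 0)
instance (n : Int) (k : Int) (a : List Int) : Decidable (Pre_process n k a) := by
  unfold Pre_process; infer_instance

def pvWitness_process : Int × Int × List Int := (2, 3, [2, 1, 0, 1])

def Spec_process (n : Int) (k : Int) (a : List Int) (out : Int) : Prop := out = process_alt n k a
instance (n : Int) (k : Int) (a : List Int) (out : Int) : Decidable (Spec_process n k a out) := by
  unfold Spec_process; infer_instance

-- ===== CLAIM (what is proved, stated in full; the proofs are below) =====
def Claim_equal_process : Prop := ∀ (n : Int) (k : Int) (a : List Int),
  Dom_process n k a → Pre_process n k a → Spec_process n k a (process n k a)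

-- ===== LEMMAS AND PROOFS =====

-- A's rotated belt deque, reconstructed from B's fixed array through an offset h (= -t)
def pvRV {α : Type} [Inhabited α] (h : Int) (l : List α) : List α :=
  (List.range l.length).map (fun i : Nat => l.getD ((h + (i : Int)) % (l.length : Int)).toNat default)

-- A's robot deque, reconstructed from B's sparse list S of occupied relative positions
def pvMask (n : Int) (S : List Int) : List Bool :=
  (List.range n.toNat).map (fun i : Nat => decide ((i : Int) ∈ S))

theorem pvRV_length {α : Type} [Inhabited α] (h : Int) (l : List α) :
    (pvRV h l).length = l.length := by simp [pvRV]

theorem pvModIdx_lt (x : Int) {len : Nat} (hl : 0 < len) : (x % (len : Int)).toNat < len := by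
  have h1 : x % (len : Int) < (len : Int) := Int.emod_lt_of_pos x (by exact_mod_cast hl)
  have h2 : 0 ≤ x % (len : Int) := Int.emod_nonneg x (by positivity)
  omega

theorem pvModIdx_inj {i j n : Int} (_hn : 0 < n) (h0 : 0 ≤ i) (h1 : i < n) (h2 : 0 ≤ j)
    (h3 : j < n) (h : Int) (he : (h + i) % n = (h + j) % n) : i = j := by
  have hd : n ∣ (h + i) - (h + j) :=
    Int.emod_eq_emod_iff_emod_sub_eq_zero.mp he |> Int.dvd_of_emod_eq_zero
  have : i - j = 0 := Int.eq_zero_of_abs_lt_dvd (by simpa using hd) (by rw [abs_lt]; omega)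
  omega

theorem pvRV_getElem {α : Type} [Inhabited α] (h : Int) (l : List α) (t : Nat)
    (ht : t < (pvRV h l).length) :
    (pvRV h l)[t] = l.getD ((h + t) % (l.length : Int)).toNat default := by
  simp only [pvRV]
  rw [List.getElem_map, List.getElem_range]

theorem pvRV_zero {α : Type} [Inhabited α] (l : List α) : pvRV 0 l = l := by
  apply List.ext_getElem (by simp [pvRV_length])
  intro t h1 h2
  rw [pvRV_getElem]
  have : ((t : Int) % (l.length : Int)).toNat = t := by
    rw [Int.emod_eq_of_lt (by positivity) (by exact_mod_cast (by simpa [pvRV_length] using h1))]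
    simp
  rw [zero_add, this, List.getD_eq_getElem l default h2]

theorem pvRot1_eq_cons {α : Type} (l : List α) (hl : l ≠ []) :
    pvRot1 l = l.getLast hl :: l.dropLast := by
  unfold pvRot1
  rw [List.getLast?_eq_some_getLast hl]

theorem pvRV_rot1 {α : Type} [Inhabited α] (h : Int) (l : List α) :
    pvRot1 (pvRV h l) = pvRV (h - 1) l := by
  rcases eq_or_ne l [] with rfl | hl
  · rfl
  have hlen : 0 < l.length := List.length_pos_iff.mpr hl
  have hrv : pvRV h l ≠ [] := by
    intro he
    have := pvRV_length h l
    rw [he] at this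
    simp at this
    omega
  rw [pvRot1_eq_cons _ hrv]
  apply List.ext_getElem
  · simp [pvRV_length]
    omega
  intro t h1 h2
  rcases Nat.eq_zero_or_pos t with rfl | ht
  · rw [List.getElem_cons_zero, List.getLast_eq_getElem, pvRV_getElem, pvRV_getElem]
    rw [pvRV_length, show (h + ↑(l.length - 1) : Int) = h - 1 + (l.length : Int) by omega]
    rw [show ((0:Nat) : Int) = 0 by rfl, add_zero]
    rw [show (h - 1 + (l.length:Int)) % (l.length:Int) = (h - 1) % (l.length:Int) by simp]
  · obtain ⟨u, rfl⟩ : ∃ u, t = u + 1 := ⟨t - 1, by omega⟩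
    rw [List.getElem_cons_succ, List.getElem_dropLast, pvRV_getElem, pvRV_getElem]
    rw [show ((u + 1 : Nat) : Int) = (u : Int) + 1 by push_cast; ring,
      show h - 1 + ((u : Int) + 1) = h + u by ring]

theorem pvRV_getD {α : Type} [Inhabited α] (h i : Int) (l : List α) (d : α)
    (h0 : 0 ≤ i) (h1 : i < (l.length : Int)) :
    PySem.List.pyGetD (pvRV h l) i d = PySem.List.pyGetD l ((h + i) % (l.length : Int)) d := by
  have hlen : 0 < l.length := by omega
  rw [PySem.List.pyGetD_eq_getElem _ d h0 (by rw [pvRV_length]; omega)]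
  rw [PySem.List.pyGetD_eq_getElem l d (Int.emod_nonneg _ (by positivity))
    (by exact_mod_cast Int.emod_lt_of_pos _ (by exact_mod_cast hlen))]
  rw [pvRV_getElem _ _ _ (by rw [pvRV_length]; omega)]
  rw [show (h + (i.toNat : Int)) = h + i by omega]
  rw [List.getD_eq_getElem l default (pvModIdx_lt _ hlen)]

theorem pvRV_setD {α : Type} [Inhabited α] (h i : Int) (l : List α) (v : α)
    (h0 : 0 ≤ i) (h1 : i < (l.length : Int)) :
    PySem.List.pySetD (pvRV h l) i v = pvRV h (PySem.List.pySetD l ((h + i) % (l.length : Int)) v) := by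
  have hlen : 0 < l.length := by omega
  rw [PySem.List.pySetD_of_nonneg _ v h0,
    PySem.List.pySetD_of_nonneg _ v (Int.emod_nonneg _ (by positivity))]
  have hsl : (l.set ((h + i) % (l.length : Int)).toNat v).length = l.length := by simp
  apply List.ext_getElem
  · simp [pvRV_length]
  intro t ht1 ht2
  have htl : t < l.length := by
    rw [List.length_set, pvRV_length] at ht1; exact ht1
  rw [List.getElem_set, pvRV_getElem _ _ t (by rw [pvRV_length]; omega),
    pvRV_getElem _ _ t (by rw [pvRV_length, hsl]; omega), hsl]
  rw [List.getD_eq_getElem (l.set ((h + i) % (l.length : Int)).toNat v) default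
      (by rw [List.length_set]; exact pvModIdx_lt _ hlen),
    List.getElem_set]
  by_cases hc : i.toNat = t
  · subst hc
    rw [show (h + ((i.toNat : Nat) : Int)) = h + i by omega, if_pos rfl, if_pos rfl]
  · have hne : ¬ ((h + i) % (l.length : Int)).toNat = ((h + (t : Int)) % (l.length : Int)).toNat := by
      intro he
      apply hc
      have : (i : Int) = (t : Int) := by
        apply pvModIdx_inj (n := (l.length : Int)) (by exact_mod_cast hlen) h0
          (by omega) (by omega) (by exact_mod_cast htl) h
        have e1 : 0 ≤ (h + i) % (l.length : Int) := Int.emod_nonneg _ (by positivity)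
        have e2 : 0 ≤ (h + (t : Int)) % (l.length : Int) := Int.emod_nonneg _ (by positivity)
        omega
      omega
    rw [if_neg hc, if_neg hne]
    exact List.getD_eq_getElem l default (pvModIdx_lt _ hlen)

theorem pvSetD_neg_one {α : Type} (l : List α) (v : α) (h : l ≠ []) :
    PySem.List.pySetD l (-1) v = PySem.List.pySetD l ((l.length : Int) - 1) v := by
  have h0 : l.length ≠ 0 := by simpa using h
  have h0' : 1 ≤ (l.length : Int) := by omega
  rw [PySem.List.pySetD_of_nonneg l (i := (l.length : Int) - 1) v (by omega)]
  simp only [PySem.List.pySetD, PySem.List.pySet?, PySem.List.pyIdx?]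
  rw [if_neg (by omega), if_pos (by omega)]
  simp only [Option.map_some, Option.getD_some]
  congr 1
  omega

-- mask basics ----------------------------------------------------------------

theorem pvMask_length (n : Int) (S : List Int) : (pvMask n S).length = n.toNat := by
  simp [pvMask]

theorem pvMask_getElem (n : Int) (S : List Int) (t : Nat) (ht : t < (pvMask n S).length) :
    (pvMask n S)[t] = decide ((t : Int) ∈ S) := by
  simp only [pvMask]
  rw [List.getElem_map, List.getElem_range]

theorem pvMask_nil (n : Int) : pvMask n [] = List.replicate n.toNat false := by
  apply List.ext_getElem (by simp [pvMask_length])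
  intro t h1 h2
  rw [pvMask_getElem, List.getElem_replicate]
  simp

theorem pvMask_congr (n : Int) (S T : List Int)
    (h : ∀ x, 0 ≤ x → x < n → (x ∈ S ↔ x ∈ T)) :
    pvMask n S = pvMask n T := by
  apply List.ext_getElem (by simp [pvMask_length])
  intro t h1 h2
  rw [pvMask_getElem, pvMask_getElem]
  have ht : (t : Int) < n := by
    rw [pvMask_length] at h1
    omega
  simp [h _ (by positivity) ht]

theorem pvMask_getD (n i : Int) (S : List Int) (h0 : 0 ≤ i) (h1 : i < n) :
    PySem.List.pyGetD (pvMask n S) i false = decide (i ∈ S) := by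
  rw [PySem.List.pyGetD_eq_getElem _ false h0 (by rw [pvMask_length]; omega)]
  rw [pvMask_getElem _ _ _ (by rw [pvMask_length]; omega)]
  congr 1
  simp only [eq_iff_iff]
  constructor <;> intro hx
  · rwa [Int.toNat_of_nonneg h0] at hx
  · rwa [Int.toNat_of_nonneg h0]

theorem pvMask_setD_true (n i : Int) (S : List Int) (h0 : 0 ≤ i) (h1 : i < n) :
    PySem.List.pySetD (pvMask n S) i true = pvMask n (i :: S) := by
  rw [PySem.List.pySetD_of_nonneg _ _ h0]
  apply List.ext_getElem (by simp [pvMask_length])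
  intro t ht1 ht2
  rw [List.getElem_set, pvMask_getElem _ _ _ (by simpa [pvMask_length] using ht2),
    pvMask_getElem _ _ _ (by rw [pvMask_length]; simpa [pvMask_length] using ht2)]
  by_cases hc : i.toNat = t
  · rw [if_pos hc]
    have : (t : Int) = i := by omega
    simp [this]
  · rw [if_neg hc]
    have : (t : Int) ≠ i := by omega
    simp [this]

theorem pvMask_setD_false (n i : Int) (S : List Int) (h0 : 0 ≤ i) (h1 : i < n) :
    PySem.List.pySetD (pvMask n S) i false = pvMask n (S.filter (fun x => x ≠ i)) := by
  rw [PySem.List.pySetD_of_nonneg _ _ h0]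
  apply List.ext_getElem (by simp [pvMask_length])
  intro t ht1 ht2
  rw [List.getElem_set, pvMask_getElem _ _ _ (by simpa [pvMask_length] using ht2),
    pvMask_getElem _ _ _ (by rw [pvMask_length]; simpa [pvMask_length] using ht2)]
  by_cases hc : i.toNat = t
  · rw [if_pos hc]
    have : (t : Int) = i := by omega
    simp [List.mem_filter, this]
  · rw [if_neg hc]
    have : (t : Int) ≠ i := by omega
    simp [List.mem_filter, this]

theorem pvMask_rot1 (n : Int) (S : List Int) (hn : 1 ≤ n)
    (hS : ∀ r ∈ S, 0 ≤ r ∧ r ≤ n - 2) :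
    pvRot1 (pvMask n S) = pvMask n (S.map (· + 1)) := by
  have hne : pvMask n S ≠ [] := by
    intro he
    have := pvMask_length n S
    rw [he] at this
    simp at this
    omega
  rw [pvRot1_eq_cons _ hne]
  apply List.ext_getElem
  · simp [pvMask_length]
    omega
  intro t h1 h2
  rcases Nat.eq_zero_or_pos t with rfl | ht
  · rw [List.getElem_cons_zero, pvMask_getElem _ _ _ (by simpa [pvMask_length] using h2),
      List.getLast_eq_getElem, pvMask_getElem _ _ _ (by rw [pvMask_length]; omega)]
    have h3 : ¬ ((((pvMask n S).length - 1 : Nat) : Int) ∈ S) := by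
      rw [pvMask_length]
      intro hx
      have := hS _ hx
      omega
    have h4 : ¬ (((0:Nat) : Int) ∈ S.map (· + 1)) := by
      simp only [List.mem_map]
      rintro ⟨r, hr, he⟩
      have := hS r hr
      omega
    rw [decide_eq_false h3, decide_eq_false h4]
  · obtain ⟨u, rfl⟩ : ∃ u, t = u + 1 := ⟨t - 1, by omega⟩
    rw [List.getElem_cons_succ, List.getElem_dropLast,
      pvMask_getElem _ _ _ (by
        simp only [List.length_cons, List.length_dropLast, pvMask_length] at h1
        rw [pvMask_length]; omega),
      pvMask_getElem _ _ _ (by simpa [pvMask_length] using h2)]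
    congr 1
    simp only [eq_iff_iff, List.mem_map]
    constructor
    · intro hu
      exact ⟨u, hu, by push_cast; ring⟩
    · rintro ⟨r, hr, he⟩
      have : r = (u : Int) := by push_cast at he; omega
      rwa [this] at hr

-- clearing A's download cell: robots[-1] = False on a mask
theorem pvMask_clear_last (n : Int) (S : List Int) (hn : 1 ≤ n) :
    PySem.List.pySetD (pvMask n S) (-1) false = pvMask n (S.filter (fun x => x ≠ n - 1)) := by
  have hne : pvMask n S ≠ [] := by
    intro he
    have := pvMask_length n S
    rw [he] at this
    simp at this
    omega
  rw [pvSetD_neg_one _ _ hne, pvMask_length,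
    show ((n.toNat : Int) - 1) = n - 1 by omega,
    pvMask_setD_false n (n-1) S (by omega) (by omega)]

-- the inner scan: A's index sweep over range(n-2,-1,-1) simulates B's sweep over the
-- sparse robot list; top' records whether a robot got parked on cell n-1 during the scan
set_option maxHeartbeats 2000000 in
theorem pvScan_sim (n m t : Int) (hn : 1 ≤ n) (hm : n ≤ m) :
    ∀ (fuelJ : Nat) (j : Int) (pending moved : List Int) (prev : Int)
      (belt : List Int) (z : Int) (top : Bool),
      fuelJ = (j + 1).toNat →
      (belt.length : Int) = m →
      j ≤ n - 2 →
      pending.Pairwise (· > ·) →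
      (∀ r ∈ pending, 1 ≤ r ∧ r ≤ j) →
      (∀ q ∈ moved, 1 ≤ q ∧ prev ≤ q ∧ q ≤ n - 2) →
      moved.Pairwise (· > ·) →
      j < prev →
      (prev ∈ moved ∨ (moved = [] ∧ prev = n)) →
      (top = true → j ≤ n - 3) →
      (∃ top' : Bool,
        (PySem.List.pyRange j (-1) (-1)).foldl pvBodyA
            (pvRV (-t) belt, pvMask n ((if top then [n-1] else []) ++ moved ++ pending), z)
          = (pvRV (-t) (pending.foldl (pvMoveB n t m) (belt, moved, prev, z)).1,
             pvMask n ((if top' then [n-1] else [])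
               ++ (pending.foldl (pvMoveB n t m) (belt, moved, prev, z)).2.1),
             (pending.foldl (pvMoveB n t m) (belt, moved, prev, z)).2.2.2))
        ∧ ((pending.foldl (pvMoveB n t m) (belt, moved, prev, z)).1.length : Int) = m
        ∧ (∀ q ∈ (pending.foldl (pvMoveB n t m) (belt, moved, prev, z)).2.1,
             1 ≤ q ∧ q ≤ n - 2)
        ∧ (pending.foldl (pvMoveB n t m) (belt, moved, prev, z)).2.1.Pairwise (· > ·) := by
  intro fuelJ
  induction fuelJ with
  | zero =>
    intro j pending moved prev belt z top hf hb hj hpp hpb hmv hmp hjp hpm htop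
    have hpe : pending = [] := by
      cases pending with
      | nil => rfl
      | cons r rest =>
        have := hpb r (by simp)
        omega
    subst hpe
    rw [PySem.List.pyRange_neg_one_eq_nil (by omega)]
    refine ⟨⟨top, ?_⟩, hb, fun q hq => ⟨(hmv q hq).1, (hmv q hq).2.2⟩, hmp⟩
    simp only [List.foldl_nil, List.append_nil]
  | succ fJ ih =>
    intro j pending moved prev belt z top hf hb hj hpp hpb hmv hmp hjp hpm htop
    have hj0 : 0 ≤ j := by omega
    have hm0 : (0:Int) < m := by omega
    have hT : ∀ x, x ∈ (if top then [(n:Int)-1] else []) → x = n - 1 ∧ top = true := by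
      rcases top with _ | _ <;> simp
    rw [PySem.List.pyRange_neg_one_cons (by omega : (-1:Int) < j)]
    rw [List.foldl_cons]
    cases pending with
    | nil =>
      have hg : PySem.List.pyGetD
          (pvMask n ((if top then [n-1] else []) ++ moved ++ ([] : List Int))) j false = false := by
        rw [pvMask_getD n j _ hj0 (by omega)]
        simp only [decide_eq_false_iff_not, List.mem_append, List.not_mem_nil, or_false]
        rintro (hx | hx)
        · obtain ⟨he, ht⟩ := hT _ hx
          have := htop ht
          omega
        · have := hmv j hx
          omega
      have hstep : pvBodyA
          (pvRV (-t) belt, pvMask n ((if top then [n-1] else []) ++ moved ++ ([] : List Int)), z) j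
          = (pvRV (-t) belt, pvMask n ((if top then [n-1] else []) ++ moved ++ ([] : List Int)), z) := by
        simp only [pvBodyA]
        rw [hg]
        simp only [Bool.false_and]
        rfl
      rw [hstep]
      exact ih (j-1) [] moved prev belt z top (by omega) hb (by omega) (by simp) (by simp)
        hmv hmp (by omega) hpm (fun h => by have := htop h; omega)
    | cons r rest =>
      have hr := hpb r (by simp)
      obtain ⟨hhead, htail⟩ := List.pairwise_cons.mp hpp
      by_cases hrj : r = j
      · subst hrj
        -- the scan index hits the rearmost unprocessed robot
        have hgj : PySem.List.pyGetD
            (pvMask n ((if top then [n-1] else []) ++ moved ++ (r :: rest))) r false = true := by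
          rw [pvMask_getD n r _ hj0 (by omega)]
          simp
        have hgj1 : PySem.List.pyGetD
            (pvMask n ((if top then [n-1] else []) ++ moved ++ (r :: rest))) (r+1) false
            = decide (prev = r + 1) := by
          rw [pvMask_getD n (r+1) _ (by omega) (by omega)]
          simp only [decide_eq_decide, List.mem_append, List.mem_cons]
          constructor
          · rintro ((hx | hx) | (hx | hx))
            · obtain ⟨he, ht⟩ := hT _ hx
              have := htop ht
              omega
            · have := hmv _ hx
              omega
            · omega
            · have := hhead _ hx
              omega
          · intro hpe
            rcases hpm with hpm | ⟨hme, hpn⟩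
            · exact Or.inl (Or.inr (hpe ▸ hpm))
            · omega
        have hJdef : (-t + (r + 1)) % m = PySem.Int.mod (r + 1 - t) m := by
          rw [PySem.Int.mod_eq_emod_of_pos hm0]
          congr 1
          ring
        have hbelt : PySem.List.pyGetD (pvRV (-t) belt) (r+1) 0
            = PySem.List.pyGetD belt (PySem.Int.mod (r + 1 - t) m) 0 := by
          rw [pvRV_getD (-t) (r+1) belt 0 (by omega) (by omega), hb, hJdef]
        -- abbreviations for B's updated belt / zero in the move case
        have hJ0 : 0 ≤ PySem.Int.mod (r + 1 - t) m := by
          rw [← hJdef]; exact Int.emod_nonneg _ (by omega)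
        have hJm : PySem.Int.mod (r + 1 - t) m < m := by
          rw [← hJdef]; exact Int.emod_lt_of_pos _ hm0
        by_cases hc : prev ≠ r + 1 ∧ 0 < PySem.List.pyGetD belt (PySem.Int.mod (r + 1 - t) m) 0
        · -- the robot moves to r+1
          obtain ⟨hc1, hc2⟩ := hc
          have hbelt' : PySem.List.pySetD (pvRV (-t) belt) (r+1)
                (PySem.List.pyGetD belt (PySem.Int.mod (r + 1 - t) m) 0 - 1)
              = pvRV (-t) (PySem.List.pySetD belt (PySem.Int.mod (r + 1 - t) m)
                (PySem.List.pyGetD belt (PySem.Int.mod (r + 1 - t) m) 0 - 1)) := by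
            rw [pvRV_setD (-t) (r+1) belt _ (by omega) (by omega), hb, hJdef]
          have hbelt'' : PySem.List.pyGetD (pvRV (-t) (PySem.List.pySetD belt
                (PySem.Int.mod (r + 1 - t) m)
                (PySem.List.pyGetD belt (PySem.Int.mod (r + 1 - t) m) 0 - 1))) (r+1) 0
              = PySem.List.pyGetD (PySem.List.pySetD belt (PySem.Int.mod (r + 1 - t) m)
                (PySem.List.pyGetD belt (PySem.Int.mod (r + 1 - t) m) 0 - 1))
                (PySem.Int.mod (r + 1 - t) m) 0 := by
            rw [pvRV_getD (-t) (r+1) _ 0 (by omega)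
              (by rw [PySem.List.length_pySetD]; omega)]
            rw [show ((PySem.List.pySetD belt (PySem.Int.mod (r + 1 - t) m)
                (PySem.List.pyGetD belt (PySem.Int.mod (r + 1 - t) m) 0 - 1)).length : Int)
                = m by rw [PySem.List.length_pySetD]; exact hb, hJdef]
          have hrobots' : PySem.List.pySetD (PySem.List.pySetD
                (pvMask n ((if top then [n-1] else []) ++ moved ++ (r :: rest))) r false)
                (r+1) true
              = pvMask n ((r+1) :: ((if top then [n-1] else []) ++ moved ++ rest)) := by
            rw [pvMask_setD_false n r _ hj0 (by omega),
              pvMask_setD_true n (r+1) _ (by omega) (by omega)]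
            apply pvMask_congr
            intro x hx0 hxn
            simp only [List.mem_cons, List.mem_filter, List.mem_append, decide_eq_true_eq]
            constructor
            · rintro (hx | ⟨(((hx | hx) | (hx | hx))), hne⟩)
              · exact Or.inl hx
              · exact Or.inr (Or.inl (Or.inl hx))
              · exact Or.inr (Or.inl (Or.inr hx))
              · simp at hne
                omega
              · exact Or.inr (Or.inr hx)
            · rintro (hx | ((hx | hx) | hx))
              · exact Or.inl hx
              · refine Or.inr ⟨Or.inl (Or.inl hx), by simp; have := (hT _ hx).1; omega⟩
              · refine Or.inr ⟨Or.inl (Or.inr hx), by simp; have := hmv _ hx; omega⟩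
              · refine Or.inr ⟨Or.inr (Or.inr hx), by simp; have := hhead _ hx; omega⟩
          have hstepA : pvBodyA (pvRV (-t) belt,
              pvMask n ((if top then [n-1] else []) ++ moved ++ (r :: rest)), z) r
              = (pvRV (-t) (PySem.List.pySetD belt (PySem.Int.mod (r + 1 - t) m)
                  (PySem.List.pyGetD belt (PySem.Int.mod (r + 1 - t) m) 0 - 1)),
                 pvMask n ((r+1) :: ((if top then [n-1] else []) ++ moved ++ rest)),
                 if PySem.List.pyGetD (PySem.List.pySetD belt (PySem.Int.mod (r + 1 - t) m)
                   (PySem.List.pyGetD belt (PySem.Int.mod (r + 1 - t) m) 0 - 1))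
                   (PySem.Int.mod (r + 1 - t) m) 0 = 0 then z + 1 else z) := by
            simp only [pvBodyA, hgj, hgj1, hbelt]
            rw [if_pos (by simp [hc1, hc2])]
            simp only [hbelt', hrobots', hbelt'']
          by_cases hlt : r + 1 < n - 1
          · have hstepB : pvMoveB n t m (belt, moved, prev, z) r
                = (PySem.List.pySetD belt (PySem.Int.mod (r + 1 - t) m)
                    (PySem.List.pyGetD belt (PySem.Int.mod (r + 1 - t) m) 0 - 1),
                   moved ++ [r+1], r + 1,
                   if PySem.List.pyGetD (PySem.List.pySetD belt (PySem.Int.mod (r + 1 - t) m)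
                     (PySem.List.pyGetD belt (PySem.Int.mod (r + 1 - t) m) 0 - 1))
                     (PySem.Int.mod (r + 1 - t) m) 0 = 0 then z + 1 else z) := by
              have hgd : (decide (prev ≠ r + 1) && decide (0 < PySem.List.pyGetD belt
                  (PySem.Int.mod (r + 1 - t) m) 0)) = true := by simp [hc1, hc2]
              simp only [pvMoveB]
              rw [hgd]
              simp [hlt]
            rw [hstepA, List.foldl_cons, hstepB]
            have hprev2 : r + 2 ≤ prev := by omega
            have hmask : pvMask n ((r+1) :: ((if top then [n-1] else []) ++ moved ++ rest))
                = pvMask n ((if top then [n-1] else []) ++ (moved ++ [r+1]) ++ rest) := by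
              apply pvMask_congr
              intro x hx0 hxn
              simp only [List.mem_cons, List.mem_append]
              tauto
            rw [hmask]
            exact ih (r-1) rest (moved ++ [r+1]) (r+1) _ _ top (by omega)
              (by rw [PySem.List.length_pySetD]; exact hb) (by omega) htail
              (fun x hx => ⟨(hpb x (by simp [hx])).1, by have := hhead x hx; omega⟩)
              (by
                intro q hq
                rcases List.mem_append.mp hq with hq | hq
                · have := hmv q hq
                  omega
                · simp at hq
                  omega)
              (by
                rw [List.pairwise_append]
                refine ⟨hmp, by simp, ?_⟩
                intro x hx y hy
                simp at hy
                have := hmv x hx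
                omega)
              (by omega) (Or.inl (by simp)) (fun h => by have := htop h; omega)
          · -- the robot steps onto the download cell n-1 and drops off
            have hr1 : r + 1 = n - 1 := by omega
            have htf : top = false := by
              rcases top with _ | _
              · rfl
              · have := htop rfl
                omega
            subst htf
            have hstepB : pvMoveB n t m (belt, moved, prev, z) r
                = (PySem.List.pySetD belt (PySem.Int.mod (r + 1 - t) m)
                    (PySem.List.pyGetD belt (PySem.Int.mod (r + 1 - t) m) 0 - 1),
                   moved, prev,
                   if PySem.List.pyGetD (PySem.List.pySetD belt (PySem.Int.mod (r + 1 - t) m)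
                     (PySem.List.pyGetD belt (PySem.Int.mod (r + 1 - t) m) 0 - 1))
                     (PySem.Int.mod (r + 1 - t) m) 0 = 0 then z + 1 else z) := by
              have hgd : (decide (prev ≠ r + 1) && decide (0 < PySem.List.pyGetD belt
                  (PySem.Int.mod (r + 1 - t) m) 0)) = true := by simp [hc1, hc2]
              simp only [pvMoveB]
              rw [hgd]
              simp [hlt]
            rw [hstepA, List.foldl_cons, hstepB]
            have hmask : pvMask n ((r+1) :: ((if false then [n-1] else []) ++ moved ++ rest))
                = pvMask n ((if true then [(n:Int)-1] else []) ++ moved ++ rest) := by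
              apply pvMask_congr
              intro x hx0 hxn
              simp only [List.mem_cons, List.mem_append, if_true, if_false]
              rw [hr1]
              simp
              tauto
            rw [hmask]
            exact ih (r-1) rest moved prev _ _ true (by omega)
              (by rw [PySem.List.length_pySetD]; exact hb) (by omega) htail
              (fun x hx => ⟨(hpb x (by simp [hx])).1, by have := hhead x hx; omega⟩)
              hmv hmp (by omega) hpm (fun _ => by omega)
        · -- blocked (or no durability): the robot stays at r
          have hcond : (true && !decide (prev = r + 1)
              && decide (0 < PySem.List.pyGetD belt (PySem.Int.mod (r + 1 - t) m) 0)) = false := by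
            rcases Decidable.em (prev = r + 1) with he | he
            · simp [he]
            · simp only [he, not_false_eq_true, decide_true, Bool.not_true, decide_not]
              have : ¬ (0 < PySem.List.pyGetD belt (PySem.Int.mod (r + 1 - t) m) 0) := by
                intro hx
                exact hc ⟨he, hx⟩
              simp [he, this]
          have hstepA : pvBodyA (pvRV (-t) belt,
              pvMask n ((if top then [n-1] else []) ++ moved ++ (r :: rest)), z) r
              = (pvRV (-t) belt,
                 pvMask n ((if top then [n-1] else []) ++ moved ++ (r :: rest)), z) := by
            simp only [pvBodyA, hgj, hgj1, hbelt]
            rw [if_neg (by rw [hcond]; simp)]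
          have hstepB : pvMoveB n t m (belt, moved, prev, z) r
              = (belt, moved ++ [r], r, z) := by
            have hgd : (decide (prev ≠ r + 1) && decide (0 < PySem.List.pyGetD belt
                (PySem.Int.mod (r + 1 - t) m) 0)) = false := by
              rcases Decidable.em (prev = r + 1) with he | he
              · simp [he]
              · have h2 : ¬ (0 < PySem.List.pyGetD belt (PySem.Int.mod (r + 1 - t) m) 0) :=
                  fun hx => hc ⟨he, hx⟩
                simp [he, h2]
            simp only [pvMoveB]
            rw [hgd]
            simp [show r < n - 1 by omega]
          rw [hstepA, List.foldl_cons, hstepB]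
          have hmask : pvMask n ((if top then [n-1] else []) ++ moved ++ (r :: rest))
              = pvMask n ((if top then [n-1] else []) ++ (moved ++ [r]) ++ rest) := by
            apply pvMask_congr
            intro x hx0 hxn
            simp only [List.mem_cons, List.mem_append]
            tauto
          rw [hmask]
          exact ih (r-1) rest (moved ++ [r]) r belt z top (by omega) hb (by omega) htail
            (fun x hx => ⟨(hpb x (by simp [hx])).1, by have := hhead x hx; omega⟩)
            (by
              intro q hq
              rcases List.mem_append.mp hq with hq | hq
              · have := hmv q hq
                omega
              · simp at hq
                omega)
            (by
              rw [List.pairwise_append]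
              refine ⟨hmp, by simp, ?_⟩
              intro x hx y hy
              simp at hy
              have := hmv x hx
              omega)
            (by omega) (Or.inl (by simp)) (fun h => by have := htop h; omega)
      · -- the scan index j carries no robot: A's body is the identity
        have hrlt : r < j := by omega
        have hg : PySem.List.pyGetD
            (pvMask n ((if top then [n-1] else []) ++ moved ++ (r :: rest))) j false = false := by
          rw [pvMask_getD n j _ hj0 (by omega)]
          simp only [decide_eq_false_iff_not, List.mem_append, List.mem_cons]
          rintro ((hx | hx) | (hx | hx))
          · obtain ⟨he, ht⟩ := hT _ hx
            have := htop ht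
            omega
          · have := hmv j hx
            omega
          · omega
          · have := hhead _ hx
            omega
        have hstep : pvBodyA (pvRV (-t) belt,
            pvMask n ((if top then [n-1] else []) ++ moved ++ (r :: rest)), z) j
            = (pvRV (-t) belt,
               pvMask n ((if top then [n-1] else []) ++ moved ++ (r :: rest)), z) := by
          simp only [pvBodyA]
          rw [hg]
          simp only [Bool.false_and]
          rfl
        rw [hstep]
        exact ih (j-1) (r :: rest) moved prev belt z top (by omega) hb (by omega) hpp
          (fun x hx => by
            rcases List.mem_cons.mp hx with rfl | hx
            · omega
            · have := hhead x hx
              have := hpb x (by simp [hx])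
              omega)
          hmv hmp (by omega) hpm (fun h => by have := htop h; omega)

-- B's rotation stage, written as filter-then-map
theorem pvFilterMapRep (n : Int) (S : List Int) :
    S.filterMap (fun r => if r + 1 < n - 1 then some (r + 1) else none)
      = (S.filter (fun r => decide (r + 1 < n - 1))).map (· + 1) := by
  induction S with
  | nil => rfl
  | cons x xs ih => by_cases h : x + 1 < n - 1 <;> simp [h, ih]

-- A's rotation followed by the first robots[-1] = False, on a mask; the n = 1 case wraps
theorem pvMask_rot_clear (n : Int) (S : List Int) (hn : 1 ≤ n)
    (hS : ∀ r ∈ S, 0 ≤ r ∧ r < n ∧ (2 ≤ n → r ≤ n - 2)) :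
    PySem.List.pySetD (pvRot1 (pvMask n S)) (-1) false
      = pvMask n ((S.map (· + 1)).filter (fun x => x ≠ n - 1)) := by
  rcases lt_or_ge n 2 with h2 | h2
  · -- n = 1: the single cell is cleared on both sides
    have hn1 : n = 1 := by omega
    subst hn1
    have hlen : (pvRot1 (pvMask 1 S)).length = 1 := by
      have h1 : (pvMask 1 S).length = 1 := by rw [pvMask_length]; rfl
      rcases hx : pvMask 1 S with _ | ⟨b, l⟩
      · rw [hx] at h1; simp at h1
      · rw [hx] at h1
        simp at h1
        simp [pvRot1, h1]
    have hne : pvRot1 (pvMask 1 S) ≠ [] := by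
      intro he
      rw [he] at hlen
      simp at hlen
    rw [pvSetD_neg_one _ _ hne, PySem.List.pySetD_of_nonneg _ _ (by rw [hlen]; simp)]
    apply List.ext_getElem (by simp [hlen, pvMask_length])
    intro i h1 h2'
    have hi : i = 0 := by
      rw [List.length_set, hlen] at h1
      omega
    subst hi
    rw [List.getElem_set, if_pos (by rw [hlen]; rfl)]
    rw [pvMask_getElem _ _ _ h2']
    have h0 : ¬ (((0:Nat) : Int) ∈ (S.map (· + 1)).filter (fun x => decide (x ≠ (1:Int) - 1))) := by
      simp only [List.mem_filter, List.mem_map]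
      rintro ⟨⟨r, hr, he⟩, _⟩
      have := hS r hr
      omega
    rw [decide_eq_false h0]
  · -- n ≥ 2: no wrap, elements stay below n - 1
    rw [pvMask_rot1 n S hn (fun r hr => ⟨(hS r hr).1, (hS r hr).2.2 h2⟩),
      pvMask_clear_last n _ hn]

-- one whole while-body: A's step from the reconstructed state equals B's step, mapped back
set_option maxHeartbeats 2000000 in
theorem pvStep_sim (n m t : Int) (hn : 1 ≤ n) (hm : n ≤ m)
    (belt : List Int) (S : List Int) (z : Int)
    (hb : (belt.length : Int) = m)
    (hS : ∀ r ∈ S, 0 ≤ r ∧ r < n ∧ (2 ≤ n → r ≤ n - 2)) (hSp : S.Pairwise (· > ·)) :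
    pvStepA n (pvRV (-t) belt, pvMask n S, z)
        = (pvRV (-(t+1)) (pvStepB n m (t+1) (belt, S, z)).1,
           pvMask n (pvStepB n m (t+1) (belt, S, z)).2.1,
           (pvStepB n m (t+1) (belt, S, z)).2.2)
      ∧ ((pvStepB n m (t+1) (belt, S, z)).1.length : Int) = m
      ∧ (∀ r ∈ (pvStepB n m (t+1) (belt, S, z)).2.1, 0 ≤ r ∧ r < n ∧ (2 ≤ n → r ≤ n - 2))
      ∧ (pvStepB n m (t+1) (belt, S, z)).2.1.Pairwise (· > ·) := by
  have hm0 : (0:Int) < m := by omega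
  have hrep : S.filterMap (fun r => if r + 1 < n - 1 then some (r + 1) else none)
      = (S.filter (fun r => decide (r + 1 < n - 1))).map (· + 1) := pvFilterMapRep n S
  set S1 := S.filterMap (fun r => if r + 1 < n - 1 then some (r + 1) else none) with hS1def
  have hS1p : S1.Pairwise (· > ·) := by
    rw [hrep, List.pairwise_map]
    exact (hSp.filter _).imp (by omega)
  have hS1b : ∀ x ∈ S1, 1 ≤ x ∧ x ≤ n - 2 := by
    rw [hrep]
    intro x hx
    simp only [List.mem_map, List.mem_filter, decide_eq_true_eq] at hx
    obtain ⟨r, ⟨hrS, hlt⟩, rfl⟩ := hx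
    have := hS r hrS
    omega
  -- A's rotation stage equals B's
  have e1 : pvRot1 (pvRV (-t) belt) = pvRV (-(t+1)) belt := by
    rw [pvRV_rot1]
    congr 1
    ring
  have e2 : PySem.List.pySetD (pvRot1 (pvMask n S)) (-1) false = pvMask n S1 := by
    rw [pvMask_rot_clear n S hn hS]
    apply pvMask_congr
    intro x hx0 hxn
    rw [hrep]
    simp only [List.mem_filter, List.mem_map, decide_eq_true_eq]
    constructor
    · rintro ⟨⟨r, hrS, rfl⟩, hne⟩
      obtain ⟨ha, hb', hc'⟩ := hS r hrS
      rcases lt_or_ge n 2 with h2 | h2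
      · omega
      · exact ⟨r, ⟨hrS, by have := hc' h2; simp at hne; omega⟩, rfl⟩
    · rintro ⟨r, ⟨hrS, hlt⟩, rfl⟩
      exact ⟨⟨r, hrS, rfl⟩, by simp; omega⟩
  -- the scan
  have hscan := pvScan_sim n m (t+1) hn hm ((n-1).toNat) (n-2) S1 [] n belt z false
    (by omega) hb (by omega) hS1p (fun r hr => ⟨(hS1b r hr).1, (hS1b r hr).2⟩)
    (by simp) (by simp) (by omega) (Or.inr ⟨rfl, rfl⟩) (fun h => by cases h)
  obtain ⟨⟨top', heq⟩, hlen, hbnd, hpair⟩ := hscan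
  set res := S1.foldl (pvMoveB n (t+1) m) (belt, [], n, z) with hresdef
  -- A's second clear of the download cell
  have e3 : PySem.List.pySetD (pvMask n ((if top' then [n-1] else []) ++ res.2.1)) (-1) false
      = pvMask n res.2.1 := by
    rw [pvMask_clear_last n _ hn]
    apply pvMask_congr
    intro x hx0 hxn
    simp only [List.mem_filter, List.mem_append, decide_eq_true_eq]
    constructor
    · rintro ⟨hx | hx, hne⟩
      · rcases top' with _ | _
        · simp at hx
        · simp at hx
          simp [hx] at hne
      · exact hx
    · intro hx
      have := hbnd x hx
      exact ⟨Or.inr hx, by simp; omega⟩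
  -- the upload cell, read through the head pointer
  have e4 : PySem.List.pyGetD (pvRV (-(t+1)) res.1) 0 0
      = PySem.List.pyGetD res.1 (PySem.Int.mod (0 - (t+1)) m) 0 := by
    rw [pvRV_getD (-(t+1)) 0 res.1 0 le_rfl (by omega), hlen,
      PySem.Int.mod_eq_emod_of_pos hm0]
    congr 1
    ring
  have e5 : PySem.List.pySetD (pvRV (-(t+1)) res.1) 0
        (PySem.List.pyGetD res.1 (PySem.Int.mod (0 - (t+1)) m) 0 - 1)
      = pvRV (-(t+1)) (PySem.List.pySetD res.1 (PySem.Int.mod (0 - (t+1)) m)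
        (PySem.List.pyGetD res.1 (PySem.Int.mod (0 - (t+1)) m) 0 - 1)) := by
    rw [pvRV_setD (-(t+1)) 0 res.1 _ le_rfl (by omega), hlen,
      PySem.Int.mod_eq_emod_of_pos hm0]
    congr 3
    ring
  have e6 : PySem.List.pyGetD (pvRV (-(t+1)) (PySem.List.pySetD res.1
        (PySem.Int.mod (0 - (t+1)) m)
        (PySem.List.pyGetD res.1 (PySem.Int.mod (0 - (t+1)) m) 0 - 1))) 0 0
      = PySem.List.pyGetD (PySem.List.pySetD res.1 (PySem.Int.mod (0 - (t+1)) m)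
        (PySem.List.pyGetD res.1 (PySem.Int.mod (0 - (t+1)) m) 0 - 1))
        (PySem.Int.mod (0 - (t+1)) m) 0 := by
    rw [pvRV_getD (-(t+1)) 0 _ 0 le_rfl (by rw [PySem.List.length_pySetD]; omega),
      show ((PySem.List.pySetD res.1 (PySem.Int.mod (0 - (t+1)) m)
        (PySem.List.pyGetD res.1 (PySem.Int.mod (0 - (t+1)) m) 0 - 1)).length : Int) = m by
        rw [PySem.List.length_pySetD]; exact hlen,
      PySem.Int.mod_eq_emod_of_pos hm0]
    congr 1
    ring
  have e7 : PySem.List.pySetD (pvMask n res.2.1) 0 true = pvMask n (res.2.1 ++ [0]) := by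
    rw [pvMask_setD_true n 0 _ le_rfl (by omega)]
    apply pvMask_congr
    intro x hx0 hxn
    simp only [List.mem_cons, List.mem_append, List.mem_singleton]
    tauto
  -- assemble
  simp only [pvStepA, pvStepB]
  rw [← hS1def, ← hresdef, e1, e2,
    show pvMask n S1 = pvMask n ((if false then [(n:Int)-1] else []) ++ [] ++ S1) from rfl,
    heq, e3, e4]
  by_cases hup : 0 < PySem.List.pyGetD res.1 (PySem.Int.mod (0 - (t+1)) m) 0
  · rw [if_pos hup, if_pos hup, e5, e6, e7]
    refine ⟨rfl, ?_, ?_, ?_⟩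
    · rw [PySem.List.length_pySetD]
      exact hlen
    · intro r hr
      rcases List.mem_append.mp hr with hr | hr
      · have := hbnd r hr
        refine ⟨by omega, by omega, fun _ => by omega⟩
      · simp at hr
        refine ⟨by omega, by omega, fun _ => by omega⟩
    · rw [List.pairwise_append]
      refine ⟨hpair, by simp, ?_⟩
      intro x hx y hy
      simp at hy
      have := hbnd x hx
      omega
  · rw [if_neg hup, if_neg hup]
    exact ⟨rfl, hlen,
      fun r hr => ⟨by have := hbnd r hr; omega, by have := hbnd r hr; omega,
        fun _ => (hbnd r hr).2⟩, hpair⟩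

theorem pvLoop_sim (n k m : Int) (hn : 1 ≤ n) (hm : n ≤ m) :
    ∀ (fuel : Nat) (t : Int) (belt S : List Int) (z : Int),
      (belt.length : Int) = m →
      (∀ r ∈ S, 0 ≤ r ∧ r < n ∧ (2 ≤ n → r ≤ n - 2)) → S.Pairwise (· > ·) →
      pvLoopA fuel n k (pvRV (-t) belt, pvMask n S, z) t = pvLoopB fuel n k m (belt, S, z) t := by
  intro fuel
  induction fuel with
  | zero => intro t belt S z _ _ _; rfl
  | succ fuel ih =>
    intro t belt S z hb hS hSp
    have hstep := pvStep_sim n m t hn hm belt S z hb hS hSp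
    simp only [pvLoopA, pvLoopB]
    rw [hstep.1]
    split_ifs with hc
    · rfl
    · exact ih (t+1) _ _ _ hstep.2.1 hstep.2.2.1 hstep.2.2.2

-- the zero counter never decreases (used for the k ≤ 0 branch of Pre_)
theorem pvBodyA_zero_le (st : List Int × List Bool × Int) (i : Int) :
    st.2.2 ≤ (pvBodyA st i).2.2 := by
  obtain ⟨b, r, z⟩ := st
  simp only [pvBodyA]
  split_ifs <;> simp <;> omega

theorem pvFoldA_zero_le (l : List Int) :
    ∀ st : List Int × List Bool × Int, st.2.2 ≤ (l.foldl pvBodyA st).2.2 := by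
  induction l with
  | nil => intro st; exact le_rfl
  | cons x xs ih => intro st; exact le_trans (pvBodyA_zero_le st x) (ih _)

theorem pvStepA_zero_le (n : Int) (st0 : List Int × List Bool × Int) :
    st0.2.2 ≤ (pvStepA n st0).2.2 := by
  obtain ⟨b, r, z⟩ := st0
  simp only [pvStepA]
  have h := pvFoldA_zero_le (PySem.List.pyRange (n-2) (-1) (-1))
    (pvRot1 b, PySem.List.pySetD (pvRot1 r) (-1) false, z)
  split_ifs <;> simp at h ⊢ <;> omega

theorem pvMoveB_zero_le (n t m : Int) (st : List Int × List Int × Int × Int) (r : Int) :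
    st.2.2.2 ≤ (pvMoveB n t m st r).2.2.2 := by
  obtain ⟨b, mv, p, z⟩ := st
  simp only [pvMoveB]
  split_ifs <;> simp <;> omega

theorem pvFoldB_zero_le (n t m : Int) (l : List Int) :
    ∀ st : List Int × List Int × Int × Int, st.2.2.2 ≤ (l.foldl (pvMoveB n t m) st).2.2.2 := by
  induction l with
  | nil => intro st; exact le_rfl
  | cons x xs ih => intro st; exact le_trans (pvMoveB_zero_le n t m st x) (ih _)

theorem pvStepB_zero_le (n m t : Int) (st0 : List Int × List Int × Int) :
    st0.2.2 ≤ (pvStepB n m t st0).2.2 := by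
  obtain ⟨b, r, z⟩ := st0
  simp only [pvStepB]
  have h := pvFoldB_zero_le n t m
    (r.filterMap (fun x => if x + 1 < n - 1 then some (x + 1) else none)) (b, [], n, z)
  split_ifs <;> simp at h ⊢ <;> omega

-- ===== VERDICT (by name: the statement is the Claim_ definition above) =====
theorem process_spec : Claim_equal_process := by
  intro n k a _ hpre
  obtain ⟨h1, hm1, hkp, hnm⟩ := hpre
  unfold Spec_process process process_alt
  rcases hnm with hnm | hk0
  · have := pvLoop_sim n k (a.length : Int) h1 hnm (pvFuel a) 0 a [] 0 rfl
      (by intro r hr; simp at hr) (by simp)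
    rw [show (-(0:Int)) = 0 by ring, pvRV_zero, pvMask_nil] at this
    exact this
  · -- k ≤ 0: both programs stop after the very first step with count 1
    obtain ⟨f, hf⟩ : ∃ f, pvFuel a = f + 1 := ⟨pvFuel a - 1, by unfold pvFuel; omega⟩
    rw [hf]
    simp only [pvLoopA, pvLoopB]
    rw [if_pos (le_trans hk0
      (pvStepA_zero_le n (a, List.replicate n.toNat false, 0)))]
    rw [if_pos (le_trans hk0 (pvStepB_zero_le n ((a.length : Int)) (0+1) (a, [], 0)))]
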